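-- pv_equiv track=rewrite | github.com/HeuristicPerson/emulauncher | libs/string_helpers.py | section_generate
-- ===== SOURCE A (Python) =====
-- def section_generate(ps_header, pls_elems):
--     """
--     Function to generate a text similar to:
--
--         Header intro text: Value 1
--                            Value 2
--                            Value 3
--                            ...
--
--     If the pls_elems list is empty, the output will be:
--
--         Header intro text:
--
--     This function will be useful when creating visually organised text output for objects "represented as strings".
--
--     :param ps_header: Text that will work as the header.
--     :type ps_header: Str
--
--     :param pls_elems:
--     :type pls_elems: List[Str]
--
--     :return: A piece of text.
--     :rtype: Str
--     """
--     s_out = ''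
--     if not pls_elems:
--         s_out += f'{ps_header}\n'
--     else:
--         for i_elem, s_elem in enumerate(pls_elems):
--             if i_elem == 0:
--                 s_out += f'{ps_header} {s_elem}\n'
--             else:
--                 s_out += f'%s {s_elem}\n' % (' '*len(ps_header))
--
--     return s_out
-- ===== SOURCE B (Python) =====
-- def section_generate(ps_header, pls_elems):
--     if not pls_elems:
--         return f'{ps_header}\n'
--     # Render every line uniformly indented, then splice the header over the
--     # first line's indentation (same width, so alignment is preserved).
--     pad = ' ' * len(ps_header)
--     body = ''.join(f'{pad} {e}\n' for e in pls_elems)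
--     return ps_header + body[len(ps_header):]
-- ===== Notes on version B (the rewrite author's own statement) =====
-- stated objective: alternative
-- what changed: Instead of A's enumerate loop with an i==0 branch, B renders every line uniformly indented (pad + ' ' + elem + '\n'), concatenates them, and then splices the header over the first line's equal-width indentation via a prefix slice; Pre_ excludes inputs where a non-first element contains '%', on which A's %-formatting of the indent template raises TypeError/ValueError unless every '%' is doubled and silently collapses '%%' to '%'.
-- outside the precondition, e.g. on section_generate('h', ['a', 'b%%c']): A returns 'h a\n  b%c\n', B returns 'h a\n  b%%c\n'
import Mathlib
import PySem

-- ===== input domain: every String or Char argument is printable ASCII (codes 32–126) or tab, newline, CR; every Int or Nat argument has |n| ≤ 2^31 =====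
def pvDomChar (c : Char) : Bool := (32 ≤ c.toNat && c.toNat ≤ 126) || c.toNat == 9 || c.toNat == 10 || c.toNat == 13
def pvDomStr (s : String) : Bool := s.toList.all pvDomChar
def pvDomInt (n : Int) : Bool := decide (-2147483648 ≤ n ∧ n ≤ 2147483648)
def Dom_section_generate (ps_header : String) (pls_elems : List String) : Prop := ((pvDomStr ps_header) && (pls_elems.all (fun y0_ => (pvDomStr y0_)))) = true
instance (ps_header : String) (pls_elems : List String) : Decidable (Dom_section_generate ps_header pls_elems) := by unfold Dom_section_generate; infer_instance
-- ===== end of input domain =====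

-- B renders every line uniformly indented and then splices the header over the first line's
-- equal-width indentation, removing A's enumerate loop and its i==0 branch (alternative decomposition).

-- ===== PORT A =====
-- A accumulates s_out; each loop step appends the header (i==0) or the indent, then ' ', the
-- element and '\n'. The non-first line is Python's  '%s {s_elem}\n' % (' '*len(ps_header),) ;
-- under Pre_ below the element contains no '%', so the template's only conversion is the leading
-- '%s' and this transliteration is exact. Ported on List Char (built once into a String).
def section_generate (ps_header : String) (pls_elems : List String) : String :=
  let s0 : List Char := []
  if pls_elems = [] then
    String.mk (s0 ++ ps_header.toList ++ ['\n'])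
  else
    String.mk ((PySem.List.enumerate pls_elems).foldl
      (fun acc p =>
        if p.1 = 0 then
          acc ++ ps_header.toList ++ ' ' :: p.2.toList ++ ['\n']
        else
          acc ++ List.replicate ps_header.toList.length ' ' ++ ' ' :: p.2.toList ++ ['\n'])
      s0)

-- ===== PORT B =====
-- ''.join of the uniform per-element lines is ported as flatten of the mapped line builder;
-- body[len(ps_header):] is PySem.List.slice with lower bound len(ps_header).
def section_generate_alt (ps_header : String) (pls_elems : List String) : String :=
  if pls_elems = [] then
    String.mk (ps_header.toList ++ ['\n'])
  else
    let pad : List Char := List.replicate ps_header.toList.length ' '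
    let body : List Char := (pls_elems.map (fun e => pad ++ ' ' :: e.toList ++ ['\n'])).flatten
    String.mk (ps_header.toList ++ PySem.List.slice body (some (ps_header.toList.length : Int)) none)

-- ===== PRECONDITION & SPEC =====
-- Pre_ excludes inputs where a non-first element contains '%': A feeds that element into the
-- %-template  '%s {s_elem}\n' , which raises TypeError/ValueError unless every '%' is doubled
-- and, where it does return ('%%' pairs only), silently collapses '%%' to '%' — a format-string
-- injection artefact B cannot sensibly match.
def Pre_section_generate (ps_header : String) (pls_elems : List String) : Prop :=
  (pls_elems.tail.all (fun e => !(e.toList.any (fun c => c = '%')))) = true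
instance (ps_header : String) (pls_elems : List String) : Decidable (Pre_section_generate ps_header pls_elems) := by unfold Pre_section_generate; infer_instance

def pvWitness_section_generate : String × List String := ("Header:", ["a%b", "cd"])

def Spec_section_generate (ps_header : String) (pls_elems : List String) (out : String) : Prop := out = section_generate_alt ps_header pls_elems
instance (ps_header : String) (pls_elems : List String) (out : String) : Decidable (Spec_section_generate ps_header pls_elems out) := by unfold Spec_section_generate; infer_instance

-- ===== CLAIM (what is proved, stated in full; the proofs are below) =====
def Claim_equal_section_generate : Prop := ∀ (ps_header : String) (pls_elems : List String), Dom_section_generate ps_header pls_elems → Pre_section_generate ps_header pls_elems → Spec_section_generate ps_header pls_elems (section_generate ps_header pls_elems)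

-- ===== LEMMAS AND PROOFS =====

-- A's loop over the tail (indices k ≥ 1): the i==0 branch never fires, so the fold flattens
-- one indented line per element onto the accumulator.
theorem sg_tail_loop (hdr : List Char) :
    ∀ (rest : List String) (k : Int), 1 ≤ k → ∀ (acc : List Char),
      (PySem.List.enumerate rest k).foldl
        (fun acc p =>
          if p.1 = 0 then
            acc ++ hdr ++ ' ' :: p.2.toList ++ ['\n']
          else
            acc ++ List.replicate hdr.length ' ' ++ ' ' :: p.2.toList ++ ['\n'])
        acc
      = acc ++ (rest.map (fun x => List.replicate hdr.length ' ' ++ ' ' :: x.toList ++ ['\n'])).flatten := by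
  intro rest
  induction rest with
  | nil => intro k _ acc; simp [PySem.List.enumerate]
  | cons x xs ih =>
    intro k hk acc
    have hk0 : ¬ (k = 0) := by omega
    simp only [PySem.List.enumerate, List.foldl_cons, if_neg hk0]
    rw [ih (k + 1) (by omega)]
    simp [List.append_assoc]

-- B's prefix splice: dropping len(hdr) chars from the uniform first line removes exactly its pad.
theorem sg_drop_pad (hdr X : List Char) :
    (List.replicate hdr.length ' ' ++ X).drop hdr.length = X := by
  exact List.drop_left' (by simp)

-- ===== VERDICT (by name: the statement is the Claim_ definition above) =====
theorem section_generate_spec : Claim_equal_section_generate := by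
  intro ps_header pls_elems _ _
  unfold Spec_section_generate section_generate section_generate_alt
  cases pls_elems with
  | nil => simp
  | cons e rest =>
    simp only [List.cons_ne_nil, if_false]
    refine congrArg String.mk ?_
    rw [PySem.List.slice_from_natCast]
    have he : PySem.List.enumerate (e :: rest) 0 = (0, e) :: PySem.List.enumerate rest 1 := by
      simp [PySem.List.enumerate]
    rw [he, List.foldl_cons]
    have hstep : (if ((0 : Int), e).1 = 0 then
          ([] : List Char) ++ ps_header.toList ++ ' ' :: e.toList ++ ['\n']
        else
          ([] : List Char) ++ List.replicate ps_header.toList.length ' ' ++ ' ' :: e.toList ++ ['\n'])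
        = ps_header.toList ++ ' ' :: e.toList ++ ['\n'] := by simp
    rw [hstep, sg_tail_loop ps_header.toList rest 1 (by omega)]
    simp only [List.map_cons, List.flatten_cons, List.append_assoc]
    rw [sg_drop_pad ps_header.toList]
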